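-- pv_equiv track=rewrite | github.com/Shruti-3004/pocs | air_ticket/ground_travel_comakeit/comakeit_ground_travel.py | get_traveler_name
-- ===== SOURCE A (Python) =====
-- def get_traveler_name(text):
--     traveler_name = []
--     for line in text:
--         if 'in words' in line.lower() or 'duty #' in line.lower():
--             break
--         if 'passengers' in line.lower():
--             words = line.split()
--             t_name = ' '.join(words[1:])
--             traveler_name.append(t_name)
--     return traveler_name
-- ===== SOURCE B (Python) =====
-- def get_traveler_name(text):
--     lines = list(text)
--     cut = len(lines)
--     for i, line in enumerate(lines):
--         if 'in words' in line.lower() or 'duty #' in line.lower():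
--             cut = i
--             break
--     return [' '.join(line.split()[1:])
--             for line in lines[:cut]
--             if 'passengers' in line.lower()]
-- ===== Notes on version B (the rewrite author's own statement) =====
-- stated objective: idiomatic
-- what changed: B splits A's single break-loop with a mutable accumulator into two phases: first find the cut index of the first break-marker line, then produce the result as one list comprehension over the sliced prefix.
import Mathlib
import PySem

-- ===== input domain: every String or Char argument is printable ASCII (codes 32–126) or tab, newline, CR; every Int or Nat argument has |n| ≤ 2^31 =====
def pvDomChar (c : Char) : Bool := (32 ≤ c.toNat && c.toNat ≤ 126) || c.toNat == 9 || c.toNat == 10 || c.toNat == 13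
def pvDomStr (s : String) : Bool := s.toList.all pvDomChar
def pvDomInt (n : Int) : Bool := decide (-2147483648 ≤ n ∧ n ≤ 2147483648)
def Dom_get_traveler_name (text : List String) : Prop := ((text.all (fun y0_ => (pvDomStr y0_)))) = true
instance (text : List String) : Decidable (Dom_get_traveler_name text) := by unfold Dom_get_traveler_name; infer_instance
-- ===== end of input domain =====

-- B replaces A's single break-loop with accumulator by two phases: find the cut index of the
-- first break-marker line, then slice and build the result with one filter+map pass (idiomatic).


-- shared line predicates (both Pythons use these identical expressions)
def pvStop (line : String) : Bool :=
  PySem.Str.isIn "in words" (PySem.Str.lower line) || PySem.Str.isIn "duty #" (PySem.Str.lower line)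
def pvPass (line : String) : Bool := PySem.Str.isIn "passengers" (PySem.Str.lower line)
def pvExtract (line : String) : String :=
  PySem.Str.join " " (PySem.List.slice (PySem.Str.split₀ line) (some 1) none)

-- ===== PORT A =====
-- A's for-loop with break and an append accumulator
def pvLoopA : List String → List String → List String
  | acc, [] => acc
  | acc, line :: rest =>
      if pvStop line then acc
      else pvLoopA (if pvPass line then acc ++ [pvExtract line] else acc) rest

def get_traveler_name (text : List String) : List String := pvLoopA [] text

-- ===== PORT B =====
-- phase 1 of B: the index of the first break-marker line (defaults to len(lines))
def pvCutB : List String → Nat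
  | [] => 0
  | line :: rest => if pvStop line then 0 else pvCutB rest + 1

def get_traveler_name_alt (text : List String) : List String :=
  let cut := pvCutB text
  ((PySem.List.slice text none (some (cut : Int))).filter pvPass).map pvExtract

-- ===== PRECONDITION & SPEC =====
def Spec_get_traveler_name (text : List String) (out : List String) : Prop := out = get_traveler_name_alt text
instance (text : List String) (out : List String) : Decidable (Spec_get_traveler_name text out) := by unfold Spec_get_traveler_name; infer_instance

-- ===== CLAIM (what is proved, stated in full; the proofs are below) =====
def Claim_equal_get_traveler_name : Prop := ∀ (text : List String), Dom_get_traveler_name text → Spec_get_traveler_name text (get_traveler_name text)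

-- ===== LEMMAS AND PROOFS =====
theorem pvLoopA_eq (ls : List String) : ∀ acc : List String,
    pvLoopA acc ls = acc ++ ((ls.take (pvCutB ls)).filter pvPass).map pvExtract := by
  induction ls with
  | nil => intro acc; simp [pvLoopA, pvCutB]
  | cons line rest ih =>
      intro acc
      by_cases h : pvStop line = true
      · simp [pvLoopA, pvCutB, h]
      · by_cases hp : pvPass line = true <;>
          simp [pvLoopA, pvCutB, h, hp, ih]

-- ===== VERDICT (by name: the statement is the Claim_ definition above) =====
theorem get_traveler_name_spec : Claim_equal_get_traveler_name := by
  intro text _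
  unfold Spec_get_traveler_name get_traveler_name get_traveler_name_alt
  rw [pvLoopA_eq]
  show _ = List.map pvExtract (List.filter pvPass (PySem.List.slice text none (some (pvCutB text : Int))))
  rw [PySem.List.slice_to_natCast]
  simp
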